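-- pv_equiv track=rewrite | github.com/HarshalCreates/Advanced-RAG-System-with-Dynamic-Model-Adaptation | app/intelligence/table_extraction.py | _extract_caption
-- ===== SOURCE A (Python) =====
-- def _extract_caption(text: str) -> str:
--     """Extract potential figure caption from text."""
--     lines = text.strip().split('\n')
--
--     # Look for lines starting with "Figure", "Fig", "Table", etc.
--     for line in lines:
--         line_lower = line.lower().strip()
--         if any(line_lower.startswith(prefix) for prefix in ['figure', 'fig.', 'table']):
--             return line.strip()
--
--     # Fallback: return first non-empty line
--     for line in lines:
--         if line.strip():
--             return line.strip()[:200]  # Limit length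
--
--     return ""
-- ===== SOURCE B (Python) =====
-- def _extract_caption(text: str) -> str:
--     """Extract potential figure caption from text (single pass with fallback accumulator)."""
--     fallback = None
--     for line in text.strip().split('\n'):
--         s = line.strip()
--         if s.lower().startswith(('figure', 'fig.', 'table')):
--             return s
--         if fallback is None and s:
--             fallback = s
--     return fallback[:200] if fallback is not None else ""
-- ===== Notes on version B (the rewrite author's own statement) =====
-- stated objective: simpler
-- what changed: Replaces A's two sequential scans over the lines with one pass that returns a caption-prefixed line immediately and carries the first non-empty line as a fallback accumulator, truncated to 200 chars only at the end.
import Mathlib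
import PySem

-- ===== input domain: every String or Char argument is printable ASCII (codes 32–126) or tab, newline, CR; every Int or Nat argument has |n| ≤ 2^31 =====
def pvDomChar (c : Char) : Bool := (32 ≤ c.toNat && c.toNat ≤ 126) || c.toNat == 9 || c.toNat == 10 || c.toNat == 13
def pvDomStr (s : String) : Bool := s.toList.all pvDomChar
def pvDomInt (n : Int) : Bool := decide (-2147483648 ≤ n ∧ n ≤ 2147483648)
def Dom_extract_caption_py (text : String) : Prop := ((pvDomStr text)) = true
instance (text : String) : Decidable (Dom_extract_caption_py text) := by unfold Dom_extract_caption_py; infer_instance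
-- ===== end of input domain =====

-- B merges A's two sequential scans over the lines into a single pass carrying the
-- first non-empty line as a fallback accumulator (objective: simpler).

def pvPrefixes : List String := ["figure", "fig.", "table"]

-- ===== PORT A =====
-- first loop: return line.strip() for the first line whose lower().strip() starts with a prefix
def pvALoop1 : List String → Option String
  | [] => none
  | line :: rest =>
    if pvPrefixes.any (fun p => PySem.Str.startswith (PySem.Str.strip (PySem.Str.lower line)) p)
    then some (PySem.Str.strip line)
    else pvALoop1 rest

-- second loop: first non-empty stripped line, truncated to 200 chars
def pvALoop2 : List String → String
  | [] => ""
  | line :: rest =>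
    if PySem.Str.strip line ≠ "" then PySem.Str.slice (PySem.Str.strip line) none (some 200)
    else pvALoop2 rest

def extract_caption_py (text : String) : String :=
  let lines := (PySem.Str.split? (PySem.Str.strip text) "\n").getD []
  match pvALoop1 lines with
  | some r => r
  | none => pvALoop2 lines

-- ===== PORT B =====
-- single pass with a fallback accumulator
def pvBLoop : List String → Option String → String
  | [], fb =>
    match fb with
    | some f => PySem.Str.slice f none (some 200)
    | none => ""
  | line :: rest, fb =>
    if pvPrefixes.any (fun p => PySem.Str.startswith (PySem.Str.lower (PySem.Str.strip line)) p)
    then PySem.Str.strip line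
    else pvBLoop rest (if fb = none ∧ PySem.Str.strip line ≠ "" then some (PySem.Str.strip line) else fb)

def extract_caption_py_alt (text : String) : String :=
  pvBLoop ((PySem.Str.split? (PySem.Str.strip text) "\n").getD []) none

-- ===== PRECONDITION & SPEC =====
def Spec_extract_caption_py (text : String) (out : String) : Prop := out = extract_caption_py_alt text
instance (text : String) (out : String) : Decidable (Spec_extract_caption_py text out) := by unfold Spec_extract_caption_py; infer_instance

-- ===== CLAIM (what is proved, stated in full; the proofs are below) =====
def Claim_equal_extract_caption_py : Prop := ∀ (text : String), Dom_extract_caption_py text → Spec_extract_caption_py text (extract_caption_py text)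

-- ===== LEMMAS AND PROOFS =====

-- lowercasing never changes whether a character is whitespace
lemma pv_isspace_lowerChar (c : Char) :
    PySem.Chars.isspace (PySem.Chars.lowerChar c) = PySem.Chars.isspace c := by
  unfold PySem.Chars.lowerChar
  split_ifs with h
  · simp only [PySem.Chars.isupper, Bool.and_eq_true, decide_eq_true_eq] at h
    obtain ⟨h1, h2⟩ := h
    have h1' : 65 ≤ c.toNat := h1
    have h2' : c.toNat ≤ 90 := h2
    have hv : (c.toNat + 32).isValidChar := Or.inl (by omega)
    have ht : (Char.ofNat (c.toNat + 32)).toNat = c.toNat + 32 := by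
      rw [Char.toNat_ofNat, if_pos hv]
    have l1 : PySem.Chars.isspace (Char.ofNat (c.toNat + 32)) = false := by
      simp only [PySem.Chars.isspace, ht, Bool.or_eq_false_iff, Bool.and_eq_false_iff,
        decide_eq_false_iff_not]
      omega
    have l2 : PySem.Chars.isspace c = false := by
      simp only [PySem.Chars.isspace, Bool.or_eq_false_iff, Bool.and_eq_false_iff,
        decide_eq_false_iff_not]
      omega
    rw [l1, l2]
  · rfl

-- strip commutes with lower
lemma pv_strip_lower (s : String) :
    PySem.Str.strip (PySem.Str.lower s) = PySem.Str.lower (PySem.Str.strip s) := by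
  simp only [PySem.Str.strip, PySem.Str.lower, PySem.Chars.strip, PySem.Chars.lower,
    PySem.Chars.lstrip, PySem.Chars.rstrip, String.toList_ofList]
  rw [List.dropWhile_map, ← List.map_reverse, List.dropWhile_map, List.map_reverse,
    show (PySem.Chars.isspace ∘ PySem.Chars.lowerChar) = PySem.Chars.isspace from
      funext fun c => pv_isspace_lowerChar c]

-- the single pass computes "first loop result, else fallback, else second loop"
lemma pv_loop_eq (lines : List String) (fb : Option String) :
    pvBLoop lines fb =
      match pvALoop1 lines with
      | some r => r
      | none =>
        match fb with
        | some f => PySem.Str.slice f none (some 200)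
        | none => pvALoop2 lines := by
  induction lines generalizing fb with
  | nil => cases fb <;> rfl
  | cons line rest ih =>
    have hB : (pvPrefixes.any fun p => PySem.Str.startswith (PySem.Str.lower (PySem.Str.strip line)) p)
        = (pvPrefixes.any fun p => PySem.Str.startswith (PySem.Str.strip (PySem.Str.lower line)) p) := by
      rw [pv_strip_lower]
    simp only [pvBLoop, pvALoop1, pvALoop2, hB]
    by_cases h : (pvPrefixes.any fun p => PySem.Str.startswith (PySem.Str.strip (PySem.Str.lower line)) p) = true
    · rw [if_pos h, if_pos h]
    · rw [if_neg h, if_neg h, ih]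
      cases hA : pvALoop1 rest with
      | some r => cases fb <;> simp
      | none =>
        cases fb with
        | some f => simp
        | none =>
          by_cases hs : PySem.Str.strip line = ""
          · simp [hs]
          · simp [hs]

-- ===== VERDICT (by name: the statement is the Claim_ definition above) =====
theorem extract_caption_py_spec : Claim_equal_extract_caption_py := by
  intro text _
  unfold Spec_extract_caption_py extract_caption_py extract_caption_py_alt
  rw [pv_loop_eq]
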